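-- pv_equiv track=rewrite | github.com/johnathanbryce/level-up | 01-algorithms/python/fundamentals/pair_products.py | pair_products
-- ===== SOURCE A (Python) =====
-- def pair_products(nums: list[int], target: int) -> list[list[int]]:
--
--     seen_nums = set()
--     pairs = []
--     for n in nums:
--         complement = target // n
--
--         if complement in seen_nums:
--             pairs.append([complement, n])
--             pass
--
--         seen_nums.add(n)
--
--     return pairs
-- ===== SOURCE B (Python) =====
-- def pair_products(nums: list[int], target: int) -> list[list[int]]:
--     # pass 1: first-occurrence index of every value
--     first = {}
--     for i, n in enumerate(nums):
--         first.setdefault(n, i)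
--     # pass 2: pair at index j iff the complement first occurs strictly before j
--     out = []
--     for j, n in enumerate(nums):
--         c = target // n
--         i = first.get(c)
--         if i is not None and i < j:
--             out.append([c, n])
--     return out
-- ===== Notes on version B (the rewrite author's own statement) =====
-- stated objective: alternative
-- what changed: Replaced the single-pass running seen-set by two staged passes: first precompute a first-occurrence index map of the whole list, then an index-based pass that emits a pair at index j iff the complement's first-occurrence index is strictly less than j.
import Mathlib
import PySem

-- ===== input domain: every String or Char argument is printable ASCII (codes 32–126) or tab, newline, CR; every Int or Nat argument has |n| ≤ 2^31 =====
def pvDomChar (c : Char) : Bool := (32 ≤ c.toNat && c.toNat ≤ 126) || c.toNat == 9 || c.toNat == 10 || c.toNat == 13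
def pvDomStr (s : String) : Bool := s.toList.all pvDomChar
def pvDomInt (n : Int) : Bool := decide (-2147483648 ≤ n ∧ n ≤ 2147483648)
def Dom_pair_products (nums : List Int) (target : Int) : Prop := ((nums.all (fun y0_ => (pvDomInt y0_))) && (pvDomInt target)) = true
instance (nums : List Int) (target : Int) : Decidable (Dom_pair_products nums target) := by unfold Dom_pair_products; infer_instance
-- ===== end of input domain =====

-- B replaces A's running seen-set by two staged passes: a precomputed first-occurrence index map, then an index-comparison pass (objective: alternative decomposition).


-- ===== PORT A =====
-- one pass; state = (seen_nums : set, pairs)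
def pair_products (nums : List Int) (target : Int) : List (List Int) :=
  (nums.foldl (fun (st : PySem.Set Int × List (List Int)) n =>
      let complement := PySem.Int.floordiv target n
      let pairs := if PySem.Set.contains st.1 complement then st.2 ++ [[complement, n]] else st.2
      (PySem.Set.add st.1 n, pairs))
    (PySem.Set.empty, [])).2

-- ===== PORT B =====
-- pass 1: first-occurrence index of every value (dict.setdefault over enumerate)
def pvFirstOcc (nums : List Int) : PySem.Dict Int Int :=
  (PySem.List.enumerate nums).foldl (fun d p => PySem.Dict.setdefault d p.2 p.1) PySem.Dict.empty

-- pass 2: pair at index j iff the complement first occurs strictly before j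
def pair_products_alt (nums : List Int) (target : Int) : List (List Int) :=
  let first := pvFirstOcc nums
  (PySem.List.enumerate nums).foldl
    (fun out p =>
      let c := PySem.Int.floordiv target p.2
      match PySem.Dict.get? first c with
      | some i => if i < p.1 then out ++ [[c, p.2]] else out
      | none => out)
    []

-- ===== PRECONDITION & SPEC =====
-- Pre_ excludes lists containing 0, on which Python's `target // n` raises ZeroDivisionError (in A and in B alike).
def Pre_pair_products (nums : List Int) (target : Int) : Prop := (0 : Int) ∉ nums
instance (nums : List Int) (target : Int) : Decidable (Pre_pair_products nums target) := by unfold Pre_pair_products; infer_instance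
def pvWitness_pair_products : List Int × Int := ([2, 3, 6, 1, 6], 6)
def Spec_pair_products (nums : List Int) (target : Int) (out : List (List Int)) : Prop := out = pair_products_alt nums target
instance (nums : List Int) (target : Int) (out : List (List Int)) : Decidable (Spec_pair_products nums target out) := by unfold Spec_pair_products; infer_instance

-- ===== CLAIM (what is proved, stated in full; the proofs are below) =====
def Claim_equal_pair_products : Prop := ∀ (nums : List Int) (target : Int), Dom_pair_products nums target → Pre_pair_products nums target → Spec_pair_products nums target (pair_products nums target)

-- ===== LEMMAS AND PROOFS =====

-- named copies of the two fold bodies (proof convenience; definitionally equal to the ports' lambdas)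
def aStep (target : Int) (st : PySem.Set Int × List (List Int)) (n : Int) : PySem.Set Int × List (List Int) :=
  let complement := PySem.Int.floordiv target n
  let pairs := if PySem.Set.contains st.1 complement then st.2 ++ [[complement, n]] else st.2
  (PySem.Set.add st.1 n, pairs)

def bStep (nums : List Int) (target : Int) (out : List (List Int)) (p : Int × Int) : List (List Int) :=
  let c := PySem.Int.floordiv target p.2
  match PySem.Dict.get? (pvFirstOcc nums) c with
  | some i => if i < p.1 then out ++ [[c, p.2]] else out
  | none => out

lemma aStep_def (target : Int) (s : PySem.Set Int) (pairs : List (List Int)) (n : Int) :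
    aStep target (s, pairs) n
      = (PySem.Set.add s n,
         if PySem.Set.contains s (PySem.Int.floordiv target n)
         then pairs ++ [[PySem.Int.floordiv target n, n]] else pairs) := rfl

lemma bStep_def (nums : List Int) (target : Int) (out : List (List Int)) (j n : Int) :
    bStep nums target out (j, n)
      = (match PySem.Dict.get? (pvFirstOcc nums) (PySem.Int.floordiv target n) with
         | some i => if i < j then out ++ [[PySem.Int.floordiv target n, n]] else out
         | none => out) := rfl

lemma contains_ofList_eq_any (pre : List Int) (c : Int) :
    PySem.Set.contains (PySem.Set.ofList pre) c = pre.any (fun x => x == c) := by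
  by_cases hc : c ∈ pre
  · have h1 : PySem.Set.contains (PySem.Set.ofList pre) c = true :=
      (PySem.Set.contains_iff _ _).mpr ((PySem.Set.mem_ofList _ _).mpr hc)
    have h2 : pre.any (fun x => x == c) = true :=
      List.any_eq_true.mpr ⟨c, hc, beq_iff_eq.mpr rfl⟩
    rw [h1, h2]
  · have h1 : PySem.Set.contains (PySem.Set.ofList pre) c = false := by
      rw [Bool.eq_false_iff]
      intro hcon
      exact hc ((PySem.Set.mem_ofList _ _).mp ((PySem.Set.contains_iff _ _).mp hcon))
    have h2 : pre.any (fun x => x == c) = false := by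
      rw [Bool.eq_false_iff]
      intro hany
      obtain ⟨x, hx, he⟩ := List.any_eq_true.mp hany
      exact hc (beq_iff_eq.mp he ▸ hx)
    rw [h1, h2]

lemma add_ofList_append (pre : List Int) (n : Int) :
    PySem.Set.add (PySem.Set.ofList pre) n = PySem.Set.ofList (pre ++ [n]) := by
  simp [PySem.Set.ofList_eq_foldl, List.foldl_append]

-- get? of a setdefault fold: an existing binding wins, else the first matching index
lemma get?_setdefault_fold (c : Int) : ∀ (l : List Int) (s : Int) (d : PySem.Dict Int Int),
    PySem.Dict.get? ((PySem.List.enumerate l s).foldl (fun d p => PySem.Dict.setdefault d p.2 p.1) d) c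
      = (PySem.Dict.get? d c).or (((PySem.List.enumerate l s).find? (fun p => p.2 == c)).map (fun x => x.1)) := by
  intro l
  induction l with
  | nil => intro s d; simp [PySem.List.enumerate_nil]
  | cons n l ih =>
    intro s d
    rw [PySem.List.enumerate_cons]
    simp only [List.foldl_cons, List.find?_cons]
    by_cases hnc : n = c
    · subst hnc
      rw [ih, PySem.Dict.get?_setdefault_self]
      simp only [beq_self_eq_true]
      cases h : PySem.Dict.get? d n <;> simp [h]
    · have h2 : ((s, n).2 == c) = false := by simp; omega
      rw [ih, h2]
      have hs : PySem.Dict.get? (PySem.Dict.setdefault d n s) c = PySem.Dict.get? d c := by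
        by_cases hcont : PySem.Dict.contains d n = true
        · rw [PySem.Dict.setdefault_of_contains d s hcont]
        · rw [PySem.Dict.setdefault_of_not_contains d s (by simpa using hcont)]
          exact PySem.Dict.get?_insert_of_ne d s (Ne.symm hnc)
      rw [hs]

lemma find_enumerate (c : Int) : ∀ (l : List Int) (s : Int),
    (((PySem.List.enumerate l s).find? (fun p => p.2 == c)).map (fun x => x.1))
      = (l.findIdx? (fun x => x == c)).map (fun k : Nat => s + (k : Int)) := by
  intro l
  induction l with
  | nil => intro s; simp [PySem.List.enumerate_nil]
  | cons n l ih =>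
    intro s
    rw [PySem.List.enumerate_cons, List.find?_cons, List.findIdx?_cons]
    by_cases hnc : n = c
    · subst hnc; simp
    · have h1 : ((s, n).2 == c) = false := by simp; omega
      have h2 : (n == c) = false := by simp; omega
      rw [h1, ih (s + 1)]
      cases h : l.findIdx? (fun x => x == c) <;> simp [h] <;> omega

lemma findIdx?_lt_take (c : Int) : ∀ (l : List Int) (j : Nat),
    (match l.findIdx? (fun x => x == c) with
     | some k => decide (k < j)
     | none => false) = (l.take j).any (fun x => x == c) := by
  intro l
  induction l with
  | nil => intro j; simp
  | cons n l ih =>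
    intro j
    rw [List.findIdx?_cons]
    by_cases hnc : n = c
    · subst hnc
      simp only [beq_self_eq_true, if_true]
      cases j with
      | zero => simp
      | succ j => simp
    · have h2 : (n == c) = false := by simp; omega
      rw [h2]
      simp only [Bool.false_eq_true, if_false]
      cases j with
      | zero =>
        cases h : l.findIdx? (fun x => x == c) <;> simp [h]
      | succ j =>
        rw [List.take_succ_cons, List.any_cons, h2, Bool.false_or, ← ih j]
        cases h : l.findIdx? (fun x => x == c) <;> simp [Nat.succ_lt_succ_iff]

-- the bridge: the B-side condition at index j equals membership in the length-j prefix
lemma cond_eq_take_any (nums : List Int) (j : Nat) (c : Int) :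
    (match PySem.Dict.get? (pvFirstOcc nums) c with
     | some i => decide (i < (j : Int))
     | none => false) = (nums.take j).any (fun x => x == c) := by
  unfold pvFirstOcc
  have hg := get?_setdefault_fold c nums 0 PySem.Dict.empty
  rw [PySem.Dict.get?_empty, Option.none_or, find_enumerate c nums 0] at hg
  rw [hg, ← findIdx?_lt_take c nums j]
  cases h : nums.findIdx? (fun x => x == c) with
  | none => simp
  | some k =>
    simp only [Option.map_some]
    exact decide_eq_decide.mpr (by omega)

lemma main_fold (nums : List Int) (target : Int) :
    ∀ (rest pre : List Int) (pairs : List (List Int)), pre ++ rest = nums →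
    (rest.foldl (aStep target) (PySem.Set.ofList pre, pairs)).2
      = (PySem.List.enumerate rest (pre.length : Int)).foldl (bStep nums target) pairs := by
  intro rest
  induction rest with
  | nil => intro pre pairs h; simp [PySem.List.enumerate_nil]
  | cons n rest ih =>
    intro pre pairs h
    rw [PySem.List.enumerate_cons, List.foldl_cons, List.foldl_cons, aStep_def, bStep_def]
    have hpre : nums.take pre.length = pre := by rw [← h]; exact List.take_left
    have hcond : (match PySem.Dict.get? (pvFirstOcc nums) (PySem.Int.floordiv target n) with
        | some i => decide (i < (pre.length : Int))
        | none => false)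
        = PySem.Set.contains (PySem.Set.ofList pre) (PySem.Int.floordiv target n) := by
      rw [cond_eq_take_any nums pre.length, hpre, contains_ofList_eq_any]
    have hstep : (match PySem.Dict.get? (pvFirstOcc nums) (PySem.Int.floordiv target n) with
        | some i => if i < (pre.length : Int) then pairs ++ [[PySem.Int.floordiv target n, n]] else pairs
        | none => pairs)
        = (if PySem.Set.contains (PySem.Set.ofList pre) (PySem.Int.floordiv target n)
           then pairs ++ [[PySem.Int.floordiv target n, n]] else pairs) := by
      rw [← hcond]
      cases hg : PySem.Dict.get? (pvFirstOcc nums) (PySem.Int.floordiv target n) with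
      | none => simp
      | some i =>
        by_cases hi : i < (pre.length : Int)
        · simp [hi]
        · simp [hi]
    rw [hstep, add_ofList_append]
    have h' : (pre ++ [n]) ++ rest = nums := by rw [← h]; simp
    have ihx := ih (pre ++ [n])
      (if PySem.Set.contains (PySem.Set.ofList pre) (PySem.Int.floordiv target n)
       then pairs ++ [[PySem.Int.floordiv target n, n]] else pairs) h'
    have hl : (((pre ++ [n]).length : Int)) = (pre.length : Int) + 1 := by simp
    rw [hl] at ihx
    exact ihx

-- ===== VERDICT (by name: the statement is the Claim_ definition above) =====
theorem pair_products_spec : Claim_equal_pair_products := by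
  intro nums target _ _
  show pair_products nums target = pair_products_alt nums target
  have e1 : pair_products nums target
      = (nums.foldl (aStep target) (PySem.Set.ofList [], [])).2 := rfl
  have e2 : pair_products_alt nums target
      = (PySem.List.enumerate nums ((([] : List Int)).length : Int)).foldl (bStep nums target) [] := rfl
  rw [e1, e2]
  exact main_fold nums target nums [] [] rfl
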